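-- pv_equiv track=rewrite | github.com/correapvf/OCROV | OCROV_images.py | clean_text
-- ===== SOURCE A (Python) =====
-- def clean_text(text):
--
--     if not text:
--         return ""
--
--     replacements = {
--         "O": "0",
--         "o": "0",
--         "I": "1",
--         "l": "1",
--         "D": "0",
--         "B": "8"
--     }
--
--     for k, v in replacements.items():
--         text = text.replace(k, v)
--
--     return text.strip()
-- ===== SOURCE B (Python) =====
-- def clean_text(text):
--
--     if not text:
--         return ""
--
--     repl = {
--         "O": "0",
--         "o": "0",
--         "I": "1",
--         "l": "1",
--         "D": "0",
--         "B": "8"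
--     }
--
--     out = []
--     for ch in text:
--         out.append(repl.get(ch, ch))
--     return "".join(out).strip()
-- ===== Notes on version B (the rewrite author's own statement) =====
-- stated objective: alternative
-- what changed: Replaces A's six whole-string replace() passes (one per confusable character) with a single pass over the characters doing a dict lookup per character, then one strip; same asymptotic cost, different traversal shape.
import Mathlib
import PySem

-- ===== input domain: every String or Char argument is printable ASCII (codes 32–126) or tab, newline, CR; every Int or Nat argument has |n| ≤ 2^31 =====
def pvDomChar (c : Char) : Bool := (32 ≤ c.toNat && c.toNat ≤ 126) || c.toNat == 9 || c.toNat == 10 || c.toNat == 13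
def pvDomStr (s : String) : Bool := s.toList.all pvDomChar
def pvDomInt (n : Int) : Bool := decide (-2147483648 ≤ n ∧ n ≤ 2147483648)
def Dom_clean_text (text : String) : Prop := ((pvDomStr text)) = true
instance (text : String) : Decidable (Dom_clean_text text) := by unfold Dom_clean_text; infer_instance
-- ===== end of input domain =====

-- B replaces A's six whole-string replace() passes with one single pass over the characters doing a table lookup per character, then strips (objective: alternative).

-- ===== PORT A =====
-- the replacements dict, iterated in insertion order
def pvReplacements : List (String × String) :=
  [("O", "0"), ("o", "0"), ("I", "1"), ("l", "1"), ("D", "0"), ("B", "8")]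

def clean_text (text : String) : String :=
  if text.toList.isEmpty then ""
  else
    PySem.Str.strip (pvReplacements.foldl (fun s kv => PySem.Str.replace s kv.1 kv.2) text)

-- ===== PORT B =====
-- the same mapping as a per-character lookup table
def pvRepl : PySem.Dict Char Char :=
  ⟨[('O', '0'), ('o', '0'), ('I', '1'), ('l', '1'), ('D', '0'), ('B', '8')]⟩

def clean_text_alt (text : String) : String :=
  if text.toList.isEmpty then ""
  else
    PySem.Str.strip (String.ofList (text.toList.map (fun ch => pvRepl.getD ch ch)))

-- ===== PRECONDITION & SPEC =====
def Spec_clean_text (text : String) (out : String) : Prop := out = clean_text_alt text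
instance (text : String) (out : String) : Decidable (Spec_clean_text text out) := by unfold Spec_clean_text; infer_instance

-- ===== CLAIM (what is proved, stated in full; the proofs are below) =====
def Claim_equal_clean_text : Prop := ∀ (text : String), Dom_clean_text text → Spec_clean_text text (clean_text text)

-- ===== LEMMAS AND PROOFS =====

-- single-character substitution, as performed by each of A's replace passes
def pvSub (k v c : Char) : Char := if c = k then v else c

-- single-character replace is a per-character map (loop of Chars.replace.go, fuel = length)
lemma go_single (k v : Char) : ∀ (cs acc : List Char),
    PySem.Chars.replace.go [k] [v] cs.length cs acc
      = acc.reverse ++ cs.map (pvSub k v) := by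
  intro cs
  induction cs with
  | nil => intro acc; rw [PySem.Chars.replace.go.eq_def]; simp
  | cons c t ih =>
    intro acc
    rw [PySem.Chars.replace.go.eq_def]
    simp only [List.length_cons, List.isPrefixOf, Bool.and_true, List.map_cons]
    by_cases hc : c = k
    · subst hc
      simp [ih, pvSub]
    · have hkc : (k == c) = false := by
        simp only [beq_eq_false_iff_ne]; exact fun h => hc h.symm
      simp [hkc, ih, pvSub, hc]

lemma replace_single (cs : List Char) (k v : Char) :
    PySem.Chars.replace cs [k] [v] = cs.map (pvSub k v) := by
  rw [PySem.Chars.replace]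
  simp [go_single]

lemma str_replace_single (s ks vs : String) (k v : Char)
    (hk : ks.toList = [k]) (hv : vs.toList = [v]) :
    (PySem.Str.replace s ks vs).toList = s.toList.map (pvSub k v) := by
  rw [PySem.Str.replace, hk, hv]
  simp [replace_single]

-- the six composed single-character substitutions equal B's one table lookup
lemma comp_eq_lookup (c : Char) :
    pvSub 'B' '8' (pvSub 'D' '0' (pvSub 'l' '1' (pvSub 'I' '1' (pvSub 'o' '0' (pvSub 'O' '0' c)))))
      = pvRepl.getD c c := by
  by_cases h1 : c = 'O'
  · subst h1; decide
  by_cases h2 : c = 'o'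
  · subst h2; decide
  by_cases h3 : c = 'I'
  · subst h3; decide
  by_cases h4 : c = 'l'
  · subst h4; decide
  by_cases h5 : c = 'D'
  · subst h5; decide
  by_cases h6 : c = 'B'
  · subst h6; decide
  have g1 : ('O' == c) = false := by simp only [beq_eq_false_iff_ne]; exact fun h => h1 h.symm
  have g2 : ('o' == c) = false := by simp only [beq_eq_false_iff_ne]; exact fun h => h2 h.symm
  have g3 : ('I' == c) = false := by simp only [beq_eq_false_iff_ne]; exact fun h => h3 h.symm
  have g4 : ('l' == c) = false := by simp only [beq_eq_false_iff_ne]; exact fun h => h4 h.symm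
  have g5 : ('D' == c) = false := by simp only [beq_eq_false_iff_ne]; exact fun h => h5 h.symm
  have g6 : ('B' == c) = false := by simp only [beq_eq_false_iff_ne]; exact fun h => h6 h.symm
  simp [pvSub, h1, h2, h3, h4, h5, h6, pvRepl, PySem.Dict.getD, PySem.Dict.get?,
    List.find?, g1, g2, g3, g4, g5, g6]

set_option maxHeartbeats 1000000 in
theorem clean_text_eq_alt (text : String) : clean_text text = clean_text_alt text := by
  unfold clean_text clean_text_alt
  by_cases h : text.toList.isEmpty
  · simp [h]
  · simp only [h, Bool.false_eq_true, if_neg, not_false_eq_true]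
    have key : (pvReplacements.foldl (fun s kv => PySem.Str.replace s kv.1 kv.2) text).toList
        = (String.ofList (text.toList.map (fun ch => pvRepl.getD ch ch))).toList := by
      simp only [pvReplacements, List.foldl_cons, List.foldl_nil]
      rw [str_replace_single _ "B" "8" 'B' '8' (by decide) (by decide),
          str_replace_single _ "D" "0" 'D' '0' (by decide) (by decide),
          str_replace_single _ "l" "1" 'l' '1' (by decide) (by decide),
          str_replace_single _ "I" "1" 'I' '1' (by decide) (by decide),
          str_replace_single _ "o" "0" 'o' '0' (by decide) (by decide),
          str_replace_single _ "O" "0" 'O' '0' (by decide) (by decide)]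
      simp only [List.map_map, String.toList_ofList]
      refine List.map_congr_left ?_
      intro c _
      simp only [Function.comp_apply]
      exact comp_eq_lookup c
    simp only [PySem.Str.strip]
    rw [key]

-- ===== VERDICT (by name: the statement is the Claim_ definition above) =====
theorem clean_text_spec : Claim_equal_clean_text := by
  intro text _
  unfold Spec_clean_text
  exact clean_text_eq_alt text
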